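-- pv_equiv track=rewrite | github.com/N0len-sasha/algoritms_and_data_structures | game_platformer/main.py | change_commands
-- ===== SOURCE A (Python) =====
-- def final_position(commands):
--     direction = 1
--     position = 0
--
--     for command in commands:
--         if command == "R":
--             direction = 1
--         elif command == "L":
--             direction = -1
--         else:
--             position += direction
--
--     return position
--
-- def change_commands(commands, commands_count):
--     final_positions = set()
--
--     for i, original_command in enumerate(commands):
--         for new_command in ["F", "L", "R"]:
--             if new_command != original_command:
--                 modified_commands = list(commands)
--                 modified_commands[i] = new_command
--                 final_positions.add(final_position(modified_commands))
--
--     return len(final_positions)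
-- ===== SOURCE B (Python) =====
-- def change_commands(commands, commands_count):
--     # O(n): suffix displacements for both entering directions, then one forward pass.
--     n = len(commands)
--     disp1 = [0] * (n + 1)   # displacement of suffix j.. when entering with direction +1
--     dispm = [0] * (n + 1)   # same, entering with direction -1
--     for j in range(n - 1, -1, -1):
--         c = commands[j]
--         if c == "R":
--             disp1[j] = disp1[j + 1]
--             dispm[j] = disp1[j + 1]
--         elif c == "L":
--             disp1[j] = dispm[j + 1]
--             dispm[j] = dispm[j + 1]
--         else:
--             disp1[j] = 1 + disp1[j + 1]
--             dispm[j] = -1 + dispm[j + 1]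
--
--     finals = set()
--     pos = 0
--     direction = 1
--     for i, c in enumerate(commands):
--         for nc in ["F", "L", "R"]:
--             if nc != c:
--                 if nc == "R":
--                     finals.add(pos + disp1[i + 1])
--                 elif nc == "L":
--                     finals.add(pos + dispm[i + 1])
--                 else:
--                     finals.add(pos + direction + (disp1[i + 1] if direction == 1 else dispm[i + 1]))
--         if c == "R":
--             direction = 1
--         elif c == "L":
--             direction = -1
--         else:
--             pos += direction
--     return len(finals)
-- ===== Notes on version B (the rewrite author's own statement) =====
-- stated objective: faster
-- what changed: A recomputes the whole walk from scratch for each of the ~2n single-command edits (O(n^2)); B precomputes, in one backward pass, the suffix displacement for each index under both entering directions and then evaluates every edit in O(1) during a single forward pass carrying the running (position, direction).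
import Mathlib
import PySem

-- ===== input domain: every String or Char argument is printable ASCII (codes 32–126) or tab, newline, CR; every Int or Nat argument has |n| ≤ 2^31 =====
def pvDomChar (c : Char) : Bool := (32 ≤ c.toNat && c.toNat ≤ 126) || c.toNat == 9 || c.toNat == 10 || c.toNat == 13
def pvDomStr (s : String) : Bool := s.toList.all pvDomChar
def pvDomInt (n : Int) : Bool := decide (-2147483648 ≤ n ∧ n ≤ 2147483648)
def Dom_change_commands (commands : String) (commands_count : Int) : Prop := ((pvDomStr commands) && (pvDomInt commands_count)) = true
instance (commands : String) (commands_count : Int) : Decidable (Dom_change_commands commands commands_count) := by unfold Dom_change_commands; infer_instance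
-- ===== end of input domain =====

-- B replaces A's O(n^2) recompute-per-edit with O(n) suffix-displacement tables and one forward pass.

-- ===== PORT A =====
def final_position (commands : List Char) : Int :=
  (commands.foldl (fun st c =>
      if c = 'R' then ((1 : Int), st.2)
      else if c = 'L' then ((-1 : Int), st.2)
      else (st.1, st.2 + st.1)) ((1 : Int), (0 : Int))).2

def change_commands (commands : String) (_commands_count : Int) : Int :=
  let L := commands.toList
  let finals := (PySem.List.enumerate L).foldl (fun s p =>
      ['F', 'L', 'R'].foldl (fun s nc =>
        if nc ≠ p.2 then PySem.Set.add s (final_position (PySem.List.pySetD L p.1 nc)) else s) s)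
    PySem.Set.empty
  PySem.Set.len finals

-- ===== PORT B =====
-- suffixDisps cs = Source B's (disp1, dispm) tables, built back-to-front: entry j is the
-- displacement of suffix cs[j:] when entered with direction +1 / -1.
def suffixDisps : List Char → List (Int × Int)
  | [] => [((0 : Int), (0 : Int))]
  | c :: cs =>
    let rest := suffixDisps cs
    let p := rest.headD (0, 0)
    (if c = 'R' then (p.1, p.1) else if c = 'L' then (p.2, p.2) else (1 + p.1, -1 + p.2)) :: rest

-- the forward pass of Source B: running (pos, direction) plus the suffix tables
def altGo : List Char → List (Int × Int) → Int → Int → PySem.Set Int → PySem.Set Int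
  | [], _, _, _, s => s
  | c :: cs, ds, pos, dir, s =>
    let p := ds.tail.headD (0, 0)
    let s := ['F', 'L', 'R'].foldl (fun s nc =>
        if nc ≠ c then
          PySem.Set.add s
            (if nc = 'R' then pos + p.1
             else if nc = 'L' then pos + p.2
             else pos + dir + (if dir = 1 then p.1 else p.2))
        else s) s
    if c = 'R' then altGo cs ds.tail pos 1 s
    else if c = 'L' then altGo cs ds.tail pos (-1) s
    else altGo cs ds.tail (pos + dir) dir s

def change_commands_alt (commands : String) (_commands_count : Int) : Int :=
  let L := commands.toList
  PySem.Set.len (altGo L (suffixDisps L) 0 1 PySem.Set.empty)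

-- ===== PRECONDITION & SPEC =====
def Spec_change_commands (commands : String) (commands_count : Int) (out : Int) : Prop := out = change_commands_alt commands commands_count
instance (commands : String) (commands_count : Int) (out : Int) : Decidable (Spec_change_commands commands commands_count out) := by unfold Spec_change_commands; infer_instance

-- ===== CLAIM (what is proved, stated in full; the proofs are below) =====
def Claim_equal_change_commands : Prop := ∀ (commands : String) (commands_count : Int), Dom_change_commands commands commands_count → Spec_change_commands commands commands_count (change_commands commands commands_count)

-- ===== LEMMAS AND PROOFS =====

-- A's loop as a structurally recursive state function (direction, position)
def stGo : List Char → Int × Int → Int × Int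
  | [], st => st
  | c :: cs, st =>
    stGo cs (if c = 'R' then ((1 : Int), st.2)
             else if c = 'L' then ((-1 : Int), st.2)
             else (st.1, st.2 + st.1))

theorem stGo_eq_foldl (cs : List Char) (st : Int × Int) :
    stGo cs st = cs.foldl (fun st c =>
      if c = 'R' then ((1 : Int), st.2)
      else if c = 'L' then ((-1 : Int), st.2)
      else (st.1, st.2 + st.1)) st := by
  induction cs generalizing st with
  | nil => rfl
  | cons c cs ih => simp [stGo, ih]

theorem final_position_eq (cs : List Char) : final_position cs = (stGo cs (1, 0)).2 := by
  rw [final_position, stGo_eq_foldl]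

theorem stGo_append (xs ys : List Char) (st : Int × Int) :
    stGo (xs ++ ys) st = stGo ys (stGo xs st) := by
  simp [stGo_eq_foldl, List.foldl_append]

theorem stGo_shift (cs : List Char) : ∀ d pos : Int,
    (stGo cs (d, pos)).2 = pos + (stGo cs (d, 0)).2 := by
  induction cs with
  | nil => intro d pos; simp [stGo]
  | cons c cs ih =>
    intro d pos
    simp only [stGo]
    split_ifs
    · rw [ih 1 pos]
    · rw [ih (-1) pos]
    · rw [ih d (pos + d), ih d (0 + d)]; omega

theorem suffixDisps_headD (cs : List Char) :
    (suffixDisps cs).headD (0, 0) = ((stGo cs (1, 0)).2, (stGo cs (-1, 0)).2) := by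
  induction cs with
  | nil => simp [suffixDisps, stGo]
  | cons c cs ih =>
    simp only [suffixDisps, List.headD_cons]
    simp only [stGo]
    split_ifs with h1 h2
    · rw [ih]
    · rw [ih]
    · rw [ih, stGo_shift cs 1 (0 + 1), stGo_shift cs (-1) (0 + -1)]
      constructor <;> omega

theorem suffixDisps_cons (c : Char) (cs : List Char) :
    suffixDisps (c :: cs) =
      (let p := (suffixDisps cs).headD (0, 0)
       if c = 'R' then (p.1, p.1) else if c = 'L' then (p.2, p.2) else (1 + p.1, -1 + p.2))
        :: suffixDisps cs := rfl

theorem altGo_cons (c : Char) (cs : List Char) (d0 : Int × Int) (ds : List (Int × Int))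
    (pos dir : Int) (s : PySem.Set Int) :
    altGo (c :: cs) (d0 :: ds) pos dir s =
      (let p := ds.headD (0, 0)
       let s' := ['F', 'L', 'R'].foldl (fun s nc =>
          if nc ≠ c then
            PySem.Set.add s
              (if nc = 'R' then pos + p.1
               else if nc = 'L' then pos + p.2
               else pos + dir + (if dir = 1 then p.1 else p.2))
          else s) s
       if c = 'R' then altGo cs ds pos 1 s'
       else if c = 'L' then altGo cs ds pos (-1) s'
       else altGo cs ds (pos + dir) dir s') := rfl

theorem main_lemma : ∀ (cs pre : List Char) (dir pos : Int) (s : PySem.Set Int),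
    (dir = 1 ∨ dir = -1) →
    stGo pre (1, 0) = (dir, pos) →
    (PySem.List.enumerate cs (pre.length : Int)).foldl (fun s p =>
        ['F', 'L', 'R'].foldl (fun s nc =>
          if nc ≠ p.2 then
            PySem.Set.add s (final_position (PySem.List.pySetD (pre ++ cs) p.1 nc)) else s) s) s
      = altGo cs (suffixDisps cs) pos dir s := by
  intro cs
  induction cs with
  | nil => intro pre dir pos s _ _; simp [PySem.List.enumerate_nil, altGo]
  | cons c cs ih =>
    intro pre dir pos s hdir hst
    rw [PySem.List.enumerate_cons, List.foldl_cons]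
    -- the inner fold adds the same three values on both sides
    have hval : ∀ nc : Char,
        final_position (PySem.List.pySetD (pre ++ c :: cs) (pre.length : Int) nc)
          = (if nc = 'R' then pos + ((suffixDisps cs).headD (0,0)).1
             else if nc = 'L' then pos + ((suffixDisps cs).headD (0,0)).2
             else pos + dir + (if dir = 1 then ((suffixDisps cs).headD (0,0)).1
                               else ((suffixDisps cs).headD (0,0)).2)) := by
      intro nc
      have hset : PySem.List.pySetD (pre ++ c :: cs) (pre.length : Int) nc
          = pre ++ nc :: cs := by
        rw [PySem.List.pySetD_natCast]
        rw [List.set_append_right _ _ (le_refl _)]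
        simp
      rw [hset, final_position_eq, stGo_append, hst, suffixDisps_headD]
      simp only [stGo]
      split_ifs with h1 h2 h3
      · rw [stGo_shift]
      · rw [stGo_shift]
      · subst h3; rw [stGo_shift cs 1 (pos + 1)]
      · rcases hdir with h | h
        · exact absurd h h3
        · subst h; rw [stGo_shift cs (-1) (pos + -1)]
    have hinner :
        (['F','L','R'].foldl (fun s nc =>
          if nc ≠ c then
            PySem.Set.add s (final_position (PySem.List.pySetD (pre ++ c :: cs) (pre.length : Int) nc)) else s) s)
        = (['F','L','R'].foldl (fun s nc =>
          if nc ≠ c then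
            PySem.Set.add s
              (if nc = 'R' then pos + ((suffixDisps cs).headD (0,0)).1
               else if nc = 'L' then pos + ((suffixDisps cs).headD (0,0)).2
               else pos + dir + (if dir = 1 then ((suffixDisps cs).headD (0,0)).1
                                 else ((suffixDisps cs).headD (0,0)).2)) else s) s) := by
      simp only [List.foldl_cons, List.foldl_nil, hval]
    rw [hinner, suffixDisps_cons, altGo_cons]
    have hlen : ((pre ++ [c]).length : Int) = (pre.length : Int) + 1 := by simp
    have hstep : stGo (pre ++ [c]) (1, 0) = stGo [c] (dir, pos) := by
      rw [stGo_append, hst]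
    have happ : pre ++ c :: cs = (pre ++ [c]) ++ cs := by simp
    show _ = (if c = 'R' then altGo cs (suffixDisps cs) pos 1 _
              else if c = 'L' then altGo cs (suffixDisps cs) pos (-1) _
              else altGo cs (suffixDisps cs) (pos + dir) dir _)
    by_cases h1 : c = 'R'
    · subst h1
      rw [if_pos rfl, ← hlen, happ,
        ih (pre ++ ['R']) 1 pos _ (Or.inl rfl) (by rw [hstep]; simp [stGo])]
    · by_cases h2 : c = 'L'
      · subst h2
        rw [if_neg (show ¬('L' = 'R') by decide), if_pos rfl, ← hlen, happ,
          ih (pre ++ ['L']) (-1) pos _ (Or.inr rfl) (by rw [hstep]; simp [stGo])]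
      · rw [if_neg h1, if_neg h2, ← hlen, happ,
          ih (pre ++ [c]) dir (pos + dir) _ hdir (by rw [hstep]; simp [stGo, h1, h2])]

-- ===== VERDICT (by name: the statement is the Claim_ definition above) =====
theorem change_commands_spec : Claim_equal_change_commands := by
  intro commands commands_count _
  show change_commands commands commands_count = change_commands_alt commands commands_count
  have := main_lemma commands.toList [] 1 0 PySem.Set.empty (Or.inl rfl) rfl
  simp only [List.nil_append, List.length_nil, Nat.cast_zero] at this
  simp only [change_commands, change_commands_alt]
  rw [this]
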